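-- pv_equiv track=rewrite | github.com/ysys143/textsearch | experiments/phase6_vectorchord/phase6_3_scaling.py | scale_corpus
-- ===== SOURCE A (Python) =====
-- from typing import Dict, List
--
-- def scale_corpus(base_docs: List[dict], target_size: int) -> List[dict]:
--     """Replicate base docs to reach target_size with unique IDs."""
--     result = []
--     i = 0
--     while len(result) < target_size:
--         doc = base_docs[i % len(base_docs)]
--         suffix = i // len(base_docs)
--         new_id = f"{doc['id']}_{suffix}" if suffix > 0 else str(doc['id'])
--         result.append({"id": new_id, "text": doc["text"]})
--         i += 1
--     return result[:target_size]
-- ===== SOURCE B (Python) =====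
-- def scale_corpus(base_docs, target_size):
--     """Replicate base docs to reach target_size with unique IDs.
--
--     Column-major construction: closed-form copy counts per document
--     (divmod of target by len), one replica column per document, then a
--     round-robin transpose merge. No flat index walk, no truncation slice.
--     """
--     if target_size <= 0:
--         return []
--     q, r = divmod(target_size, len(base_docs))
--     columns = []
--     for j, doc in enumerate(base_docs):
--         copies = q + (1 if j < r else 0)
--         column = []
--         for s in range(copies):
--             new_id = str(doc["id"]) if s == 0 else f"{doc['id']}_{s}"
--             column.append({"id": new_id, "text": doc["text"]})
--         columns.append(column)
--     result = []
--     for s in range(q + (1 if r else 0)):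
--         for col in columns:
--             if s < len(col):
--                 result.append(col[s])
--     return result
-- ===== Notes on version B (the rewrite author's own statement) =====
-- stated objective: alternative
-- what changed: Replaces A's flat while-loop that walks a single index with modular arithmetic and truncates with a slice by a column-major construction: closed-form per-document copy counts from divmod(target,len), one replica column built per document, then a round-robin transpose merge producing exactly target_size items with no slice.
import Mathlib
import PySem

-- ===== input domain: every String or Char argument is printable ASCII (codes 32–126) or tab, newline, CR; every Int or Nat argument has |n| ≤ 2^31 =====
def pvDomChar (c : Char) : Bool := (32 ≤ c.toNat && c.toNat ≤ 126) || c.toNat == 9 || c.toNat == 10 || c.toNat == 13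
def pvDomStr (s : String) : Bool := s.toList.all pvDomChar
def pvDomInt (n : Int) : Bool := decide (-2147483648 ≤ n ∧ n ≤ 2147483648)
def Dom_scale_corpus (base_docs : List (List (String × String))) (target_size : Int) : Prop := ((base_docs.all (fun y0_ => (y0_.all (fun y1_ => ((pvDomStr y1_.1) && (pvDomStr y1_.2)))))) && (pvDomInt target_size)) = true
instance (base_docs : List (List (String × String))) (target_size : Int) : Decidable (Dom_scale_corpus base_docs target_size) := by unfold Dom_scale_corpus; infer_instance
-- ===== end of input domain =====

-- B replaces A's flat index walk with modular arithmetic and a truncating slice by a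
-- column-major construction: closed-form per-document copy counts (divmod), one replica
-- column per document, then a round-robin transpose merge (objective: alternative).

-- doc['id'] on a Python dict given to us as an association list: dict(pairs) lookup
-- (duplicate keys: last wins, as Python's dict() does). Default "" is only reached
-- outside Pre_scale_corpus (Python raises KeyError there).
def pvGet (doc : List (String × String)) (k : String) : String :=
  (PySem.Dict.ofList doc).getD k ""

-- ===== PORT A =====
-- while len(result) < target_size: …  ; fuel = target_size.toNat bounds the number of
-- iterations (each iteration appends exactly one element, so this is exact).
def scaleLoopA (base_docs : List (List (String × String))) (target_size : Int) :
    Nat → List (List (String × String)) → Nat → List (List (String × String))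
  | 0, result, _ => result
  | fuel+1, result, i =>
    if (result.length : Int) < target_size then
      let doc := (PySem.List.pyGet? base_docs ((i % base_docs.length : Nat) : Int)).getD []
      let suffix := i / base_docs.length
      let new_id := if suffix > 0 then pvGet doc "id" ++ "_" ++ PySem.Int.toStr (suffix : Int)
                    else pvGet doc "id"
      scaleLoopA base_docs target_size fuel (result ++ [[("id", new_id), ("text", pvGet doc "text")]]) (i+1)
    else result

def scale_corpus (base_docs : List (List (String × String))) (target_size : Int) : List (List (String × String)) :=
  PySem.List.slice (scaleLoopA base_docs target_size target_size.toNat [] 0) none (some target_size)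

-- ===== PORT B =====
-- new doc built from `doc` for replica number `suffix` (s == 0 keeps the bare id)
def mkDocB (doc : List (String × String)) (suffix : Int) : List (String × String) :=
  let new_id := if suffix = 0 then pvGet doc "id" else pvGet doc "id" ++ "_" ++ PySem.Int.toStr suffix
  [("id", new_id), ("text", pvGet doc "text")]

-- 'for j, doc in enumerate(base_docs): … columns.append(column)' — the per-document
-- replica column has q + (1 if j < r else 0) entries, built by 'for s in range(copies)'
def buildCols (q r : Int) : Int → List (List (String × String)) → List (List (List (String × String)))
  | _, [] => []
  | j, doc :: rest =>
    ((PySem.List.pyRange 0 (q + if j < r then 1 else 0) 1).map (fun s => mkDocB doc s))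
      :: buildCols q r (j + 1) rest

def scale_corpus_alt (base_docs : List (List (String × String))) (target_size : Int) : List (List (String × String)) :=
  if target_size ≤ 0 then []
  else if base_docs.length = 0 then []  -- Python B raises ZeroDivisionError here, like A; excluded by Pre_
  else
    let q := PySem.Int.floordiv target_size (base_docs.length : Int)
    let r := PySem.Int.mod target_size (base_docs.length : Int)
    let cols := buildCols q r 0 base_docs
    -- 'for s in range(rows): for col in columns: if s < len(col): result.append(col[s])'
    (PySem.List.pyRange 0 (q + if r = 0 then 0 else 1) 1).flatMap (fun s =>
      cols.filterMap (fun col =>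
        if s < (col.length : Int) then PySem.List.pyGet? col s else none))

-- ===== PRECONDITION & SPEC =====
-- Pre_ excludes exactly the inputs where Python A raises: ZeroDivisionError (empty
-- base_docs with positive target) and KeyError (a visited doc — one of the first
-- min(target_size, len) docs — missing the 'id' or 'text' key).
def Pre_scale_corpus (base_docs : List (List (String × String))) (target_size : Int) : Prop :=
  target_size ≤ 0 ∨
    (base_docs ≠ [] ∧
      ∀ d ∈ base_docs.take (min target_size.toNat base_docs.length),
        (PySem.Dict.ofList d).contains "id" = true ∧ (PySem.Dict.ofList d).contains "text" = true)
instance (base_docs : List (List (String × String))) (target_size : Int) : Decidable (Pre_scale_corpus base_docs target_size) := by unfold Pre_scale_corpus; infer_instance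

def pvWitness_scale_corpus : (List (List (String × String))) × Int :=
  ([[("id", "a"), ("text", "hello")], [("id", "b"), ("text", "world")]], 5)

def Spec_scale_corpus (base_docs : List (List (String × String))) (target_size : Int) (out : List (List (String × String))) : Prop := out = scale_corpus_alt base_docs target_size
instance (base_docs : List (List (String × String))) (target_size : Int) (out : List (List (String × String))) : Decidable (Spec_scale_corpus base_docs target_size out) := by unfold Spec_scale_corpus; infer_instance

-- ===== CLAIM (what is proved, stated in full; the proofs are below) =====
def Claim_equal_scale_corpus : Prop := ∀ (base_docs : List (List (String × String))) (target_size : Int), Dom_scale_corpus base_docs target_size → Pre_scale_corpus base_docs target_size → Spec_scale_corpus base_docs target_size (scale_corpus base_docs target_size)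

-- ===== LEMMAS AND PROOFS =====

-- the j-th emitted document (A's view: index arithmetic on the flat position j)
def mkAt (base_docs : List (List (String × String))) (j : Nat) : List (String × String) :=
  mkDocB ((PySem.List.pyGet? base_docs ((j % base_docs.length : Nat) : Int)).getD [])
    ((j / base_docs.length : Nat) : Int)

theorem scaleLoopA_spec (bd : List (List (String × String))) (t : Int) (ht : 0 ≤ t) :
    ∀ (fuel : Nat) (result : List (List (String × String))) (i : Nat),
      result.length + fuel = t.toNat →
      scaleLoopA bd t fuel result i = result ++ (List.range' i fuel).map (mkAt bd) := by
  intro fuel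
  induction fuel with
  | zero => intro result i _; simp [scaleLoopA]
  | succ f ih =>
    intro result i h
    have hlt : (result.length : Int) < t := by omega
    rw [scaleLoopA, if_pos hlt]
    rw [ih _ (i+1) (by simp only [List.length_append, List.length_cons, List.length_nil]; omega)]
    have hfirst : [[("id", if i / bd.length > 0 then
             pvGet ((PySem.List.pyGet? bd ((i % bd.length : Nat) : Int)).getD []) "id" ++ "_" ++
               PySem.Int.toStr ((i / bd.length : Nat) : Int)
         else pvGet ((PySem.List.pyGet? bd ((i % bd.length : Nat) : Int)).getD []) "id"),
        ("text", pvGet ((PySem.List.pyGet? bd ((i % bd.length : Nat) : Int)).getD []) "text")]] =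
        [mkAt bd i] := by
      simp only [mkAt, mkDocB]
      by_cases h0 : i / bd.length = 0
      · rw [if_neg (Nat.not_lt.mpr (Nat.le_of_eq h0)), if_pos (by exact_mod_cast h0)]
      · rw [if_pos (Nat.pos_of_ne_zero h0), if_neg (by exact_mod_cast h0)]
    rw [List.append_assoc, hfirst, List.range'_succ, List.map_cons]
    simp

theorem mkAt_block (bd : List (List (String × String))) (hn : 0 < bd.length) (s : Nat) :
    ∀ (k : Nat) (hk : k < bd.length), mkAt bd (s * bd.length + k) = mkDocB (bd[k]'hk) (s : Int) := by
  intro k hk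
  unfold mkAt
  have hmod : (s * bd.length + k) % bd.length = k := by
    rw [Nat.mul_comm s bd.length, Nat.mul_add_mod]; exact Nat.mod_eq_of_lt hk
  have hdiv : (s * bd.length + k) / bd.length = s := by
    rw [Nat.mul_comm s bd.length, Nat.mul_add_div hn, Nat.div_eq_of_lt hk, Nat.add_zero]
  rw [hmod, hdiv]
  rw [PySem.List.pyGet?_natCast]
  simp [List.getElem?_eq_getElem hk]

-- the filterMap body of B's transpose applied to one replica column of c entries
theorem f_col (c : Nat) (doc : List (String × String)) (k : Nat) :
    (if ((k : Nat) : Int) < ((((PySem.List.pyRange 0 (c : Int) 1).map (fun s => mkDocB doc s)).length : Nat) : Int)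
       then PySem.List.pyGet? ((PySem.List.pyRange 0 (c : Int) 1).map (fun s => mkDocB doc s)) ((k : Nat) : Int)
       else none)
    = if k < c then some (mkDocB doc ((k : Nat) : Int)) else none := by
  rw [PySem.List.pyRange_one]
  simp only [sub_zero, Int.toNat_natCast, List.map_map, List.length_map, List.length_range,
    PySem.List.pyGet?_natCast, List.getElem?_map]
  by_cases hk : k < c
  · rw [if_pos (by exact_mod_cast hk), if_pos hk, List.getElem?_range hk]
    simp
  · rw [if_neg (by exact_mod_cast hk), if_neg hk]

-- copies count q + (j < r) sees position s iff flat index s*n + j is below T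
theorem cj_iff (n T q r s j : Nat) (_hn : 0 < n) (hT : n * q + r = T) (hr : r < n) (hj : j < n) :
    (s < q + (if j < r then 1 else 0)) ↔ s * n + j < T := by
  rcases Nat.lt_trichotomy s q with h | h | h
  · have h1 : (s + 1) * n ≤ q * n := Nat.mul_le_mul_right n h
    have h2 : (s + 1) * n = s * n + n := by ring
    have h3 : q * n = n * q := by ring
    constructor
    · intro _; omega
    · intro _; split_ifs <;> omega
  · subst h
    have h3 : s * n = n * s := by ring
    constructor
    · intro hlt
      by_cases hjr : j < r
      · omega
      · rw [if_neg hjr] at hlt; omega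
    · intro hlt
      have hjr : j < r := by omega
      rw [if_pos hjr]; omega
  · have h1 : (q + 1) * n ≤ s * n := Nat.mul_le_mul_right n h
    have h2 : (q + 1) * n = q * n + n := by ring
    have h3 : q * n = n * q := by ring
    constructor
    · intro hlt; split_ifs at hlt <;> omega
    · intro _; omega

-- row s of B's transpose over the columns built from bd.drop j equals A's flat output
-- for the flat positions s*n + j, …, going while they stay below T
theorem row_lemma (bd : List (List (String × String))) (q r T : Nat)
    (hn : 0 < bd.length) (hT : bd.length * q + r = T) (hr : r < bd.length) (s : Nat) :
    ∀ (d j : Nat), j + d = bd.length →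
      List.filterMap (fun col =>
          if ((s : Nat) : Int) < ((col.length : Nat) : Int)
          then PySem.List.pyGet? col ((s : Nat) : Int) else none)
        (buildCols (q : Int) (r : Int) (j : Int) (bd.drop j))
      = (List.range' (s * bd.length + j) (min (bd.length - j) (T - (s * bd.length + j)))).map (mkAt bd) := by
  intro d
  induction d with
  | zero =>
    intro j hj
    rw [List.drop_of_length_le (by omega)]
    have : min (bd.length - j) (T - (s * bd.length + j)) = 0 := by omega
    rw [this]
    simp [buildCols]
  | succ d ih =>
    intro j hj
    have hjlt : j < bd.length := by omega
    rw [List.drop_eq_getElem_cons hjlt, buildCols, List.filterMap_cons]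
    have hcast : ((q : Int) + if (j : Int) < (r : Int) then 1 else 0)
        = (((q + if j < r then 1 else 0) : Nat) : Int) := by
      by_cases hjr : j < r
      · rw [if_pos (by exact_mod_cast hjr), if_pos hjr]; push_cast; ring
      · rw [if_neg (by exact_mod_cast hjr), if_neg hjr]; push_cast; ring
    rw [hcast, f_col (q + if j < r then 1 else 0) (bd[j]'hjlt) s]
    have hrec := ih (j + 1) (by omega)
    have hjcast : (j : Int) + 1 = (((j + 1) : Nat) : Int) := by push_cast; ring
    rw [hjcast] at *
    by_cases hcond : s * bd.length + j < T
    · rw [if_pos ((cj_iff bd.length T q r s j hn hT hr hjlt).mpr hcond)]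
      rw [hrec]
      have hmin : min (bd.length - j) (T - (s * bd.length + j))
          = (min (bd.length - (j + 1)) (T - (s * bd.length + (j + 1)))) + 1 := by omega
      rw [hmin, List.range'_succ, List.map_cons]
      rw [← mkAt_block bd hn s j hjlt]
      rfl
    · rw [if_neg (fun h => hcond ((cj_iff bd.length T q r s j hn hT hr hjlt).mp h))]
      have h1 : min (bd.length - (j + 1)) (T - (s * bd.length + (j + 1))) = 0 := by omega
      have h2 : min (bd.length - j) (T - (s * bd.length + j)) = 0 := by omega
      simp only [hrec, h1, h2, List.range'_zero, List.map_nil]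

-- flattening the rows s, s+1, …, rows-1 of blocks min n (T - s*n) gives positions s*n … T-1
theorem flat_lemma (bd : List (List (String × String))) (q r T : Nat)
    (hn : 0 < bd.length) (hT : bd.length * q + r = T) (hr : r < bd.length) :
    ∀ (d s : Nat), s + d = q + (if r = 0 then 0 else 1) →
      (List.range' s d).flatMap (fun s =>
        (List.range' (s * bd.length) (min bd.length (T - s * bd.length))).map (mkAt bd))
      = (List.range' (s * bd.length) (T - s * bd.length)).map (mkAt bd) := by
  intro d
  induction d with
  | zero =>
    intro s hs
    have hTle : T ≤ s * bd.length := by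
      by_cases hz : r = 0
      · rw [if_pos hz] at hs
        have hsq : s = q := by omega
        have : s * bd.length = bd.length * q := by rw [hsq]; ring
        omega
      · rw [if_neg hz] at hs
        have hsq : s = q + 1 := by omega
        have : s * bd.length = bd.length * q + bd.length := by rw [hsq]; ring
        omega
    have : T - s * bd.length = 0 := by omega
    rw [this]
    simp
  | succ d ih =>
    intro s hs
    rw [List.range'_succ, List.flatMap_cons, ih (s + 1) (by omega)]
    have hs1 : (s + 1) * bd.length = s * bd.length + bd.length := by ring
    by_cases hfull : s * bd.length + bd.length ≤ T
    · have hmin : min bd.length (T - s * bd.length) = bd.length := by omega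
      rw [hmin, hs1]
      rw [← List.map_append]
      congr 1
      have := List.range'_append (s := s * bd.length) (m := bd.length)
        (n := T - (s * bd.length + bd.length)) (step := 1)
      rw [Nat.one_mul] at this
      rw [this]
      congr 1
      omega
    · have h1 : T - (s + 1) * bd.length = 0 := by omega
      rw [h1]
      have hmin : min bd.length (T - s * bd.length) = T - s * bd.length := by omega
      rw [hmin]
      simp

theorem slice_nil_to (t : Int) :
    PySem.List.slice ([] : List (List (String × String))) none (some t) = [] := by
  simp [PySem.List.slice]

-- ===== VERDICT (by name: the statement is the Claim_ definition above) =====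
theorem scale_corpus_spec : Claim_equal_scale_corpus := by
  intro bd t _hdom hpre
  unfold Spec_scale_corpus scale_corpus scale_corpus_alt
  by_cases ht : t ≤ 0
  · rw [if_pos ht]
    have h0 : t.toNat = 0 := by omega
    rw [h0, scaleLoopA]
    exact slice_nil_to t
  · rw [if_neg ht]
    replace ht : 0 < t := by omega
    have hbd : bd ≠ [] := by
      rcases hpre with h | ⟨h, _⟩
      · omega
      · exact h
    have hn : 0 < bd.length := List.length_pos_of_ne_nil hbd
    rw [if_neg (by omega)]
    -- A's side: the flat list of the first T generated docs
    rw [scaleLoopA_spec bd t (by omega) t.toNat [] 0 (by simp)]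
    simp only [List.nil_append]
    rw [PySem.List.slice_to _ (by omega)]
    rw [List.take_of_length_le (by simp)]
    -- B's side: normalise divmod to Nat, ranges to List.range'
    set T := t.toNat with hTdef
    have htT : t = (T : Int) := by omega
    have hq : PySem.Int.floordiv t (bd.length : Int) = ((T / bd.length : Nat) : Int) := by
      rw [htT]; exact PySem.Int.floordiv_natCast T bd.length
    have hrr : PySem.Int.mod t (bd.length : Int) = ((T % bd.length : Nat) : Int) := by
      rw [htT]; exact PySem.Int.mod_natCast T bd.length
    simp only [hq, hrr]
    set q := T / bd.length with hqdef
    set r := T % bd.length with hrdef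
    have hT : bd.length * q + r = T := Nat.div_add_mod T bd.length
    have hr : r < bd.length := Nat.mod_lt T hn
    have hrows : ((q : Int) + if ((r : Nat) : Int) = 0 then 0 else 1)
        = (((q + if r = 0 then 0 else 1) : Nat) : Int) := by
      by_cases hz : r = 0
      · rw [if_pos (by exact_mod_cast hz), if_pos hz]; push_cast; ring
      · rw [if_neg (by exact_mod_cast hz), if_neg hz]; push_cast; ring
    rw [hrows, PySem.List.pyRange_one]
    have hzero : ((((q + if r = 0 then 0 else 1) : Nat) : Int) - 0).toNat
        = q + (if r = 0 then 0 else 1) := by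
      rw [sub_zero, Int.toNat_natCast]
    rw [hzero, List.flatMap_map]
    have hrow : ∀ k : Nat,
        List.filterMap (fun col =>
            if ((0 : Int) + (k : Int)) < ((col.length : Nat) : Int)
            then PySem.List.pyGet? col ((0 : Int) + (k : Int)) else none)
          (buildCols (q : Int) (r : Int) 0 bd)
        = (List.range' (k * bd.length) (min bd.length (T - k * bd.length))).map (mkAt bd) := by
      intro k
      have h0 : ((0 : Int) + (k : Int)) = ((k : Nat) : Int) := by ring
      simp only [h0]
      have := row_lemma bd q r T hn hT hr k bd.length 0 (by omega)
      simp only [List.drop_zero, Nat.add_zero, Nat.sub_zero, Nat.cast_zero] at this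
      exact this
    calc (List.range' 0 T).map (mkAt bd)
        = (List.range' (0 * bd.length) (T - 0 * bd.length)).map (mkAt bd) := by norm_num
      _ = (List.range' 0 (q + if r = 0 then 0 else 1)).flatMap (fun s =>
            (List.range' (s * bd.length) (min bd.length (T - s * bd.length))).map (mkAt bd)) := by
          rw [flat_lemma bd q r T hn hT hr (q + if r = 0 then 0 else 1) 0 (Nat.zero_add _)]
      _ = (List.range (q + if r = 0 then 0 else 1)).flatMap (fun s =>
            (List.range' (s * bd.length) (min bd.length (T - s * bd.length))).map (mkAt bd)) := by
          rw [List.range_eq_range']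
      _ = _ := by
          refine (List.flatMap_congr ?_).symm
          intro k _
          exact hrow k
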